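-- pv_equiv track=rewrite | github.com/Laughingtt/python-journey | package/lmdb/eggroll/hash_key.py | hash_code
-- ===== SOURCE A (Python) =====
-- M = 2 ** 31
--
-- def hash_code(s):
--     seed = 31
--     h = len(s)
--     for c in s:
--         # to singed int
--         if c > 127:
--             c = -256 + c
--         h = h * seed
--         if h > 2147483647 or h < -2147483648:
--             h = (h & (M - 1)) - (h & M)
--         h = h + c
--         if h > 2147483647 or h < -2147483648:
--             h = (h & (M - 1)) - (h & M)
--     if h == 0 or h == -2147483648:
--         h = 1
--     return h if h >= 0 else abs(h)
-- ===== SOURCE B (Python) =====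
-- def hash_code(s):
--     # right-to-left weighted sum: adj(c_i)*31^(n-1-i) plus n*31^n for the seed,
--     # one signed 32-bit reduction at the end
--     n = len(s)
--     total = n * pow(31, n, 4294967296)
--     p = 1
--     for c in reversed(s):
--         total += (c - 256 if c > 127 else c) * p
--         p = p * 31 % 4294967296
--     u = total % 4294967296
--     h = u - 4294967296 if u >= 2147483648 else u
--     if h == 0 or h == -2147483648:
--         h = 1
--     return h if h >= 0 else abs(h)
-- ===== Notes on version B (the rewrite author's own statement) =====
-- stated objective: alternative
-- what changed: Replaces A's left-to-right Horner loop with per-step signed 32-bit mask reductions by a right-to-left weighted sum of the signed bytes against an accumulated power of 31 (plus n*pow(31,n,2**32) for the length seed), with a single signed 32-bit reduction at the end; equivalent because both compute the same polynomial value mod 2**32.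
import Mathlib
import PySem

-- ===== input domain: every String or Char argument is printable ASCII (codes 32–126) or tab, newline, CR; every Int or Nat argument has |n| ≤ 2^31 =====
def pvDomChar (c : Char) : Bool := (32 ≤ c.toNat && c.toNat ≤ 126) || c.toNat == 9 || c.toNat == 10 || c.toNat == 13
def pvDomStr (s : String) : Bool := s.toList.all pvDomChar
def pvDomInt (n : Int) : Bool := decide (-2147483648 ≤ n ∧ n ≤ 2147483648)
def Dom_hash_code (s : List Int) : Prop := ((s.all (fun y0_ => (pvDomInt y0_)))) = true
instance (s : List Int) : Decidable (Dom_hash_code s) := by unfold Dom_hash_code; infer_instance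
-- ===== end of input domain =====

-- B replaces A's left-to-right Horner loop with per-step signed 32-bit mask reductions
-- by a right-to-left weighted sum against an accumulated power of 31, reduced to a
-- signed 32-bit value once at the end (objective: alternative, same O(n) cost).

-- ===== PORT A =====
def hash_code (s : List Int) : Int :=
  let seed : Int := 31
  let h := s.foldl (fun h c =>
    let c := if c > 127 then -256 + c else c
    let h := h * seed
    let h := if h > 2147483647 ∨ h < -2147483648
             then PySem.Int.band h (2147483648 - 1) - PySem.Int.band h 2147483648 else h
    let h := h + c
    if h > 2147483647 ∨ h < -2147483648
    then PySem.Int.band h (2147483648 - 1) - PySem.Int.band h 2147483648 else h)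
    (s.length : Int)
  let h := if h = 0 ∨ h = -2147483648 then 1 else h
  if h ≥ 0 then h else |h|

-- ===== PORT B =====
def hash_code_alt (s : List Int) : Int :=
  let n : Int := s.length
  let total := n * PySem.Int.mod (31 ^ s.length) 4294967296   -- pow(31, n, 2**32)
  let res := s.reverse.foldl (fun (tp : Int × Int) c =>
      (tp.1 + (if c > 127 then c - 256 else c) * tp.2,
       PySem.Int.mod (tp.2 * 31) 4294967296))
    (total, 1)
  let u := PySem.Int.mod res.1 4294967296
  let h := if u ≥ 2147483648 then u - 4294967296 else u
  let h := if h = 0 ∨ h = -2147483648 then 1 else h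
  if h ≥ 0 then h else |h|

-- ===== PRECONDITION & SPEC =====
def Spec_hash_code (s : List Int) (out : Int) : Prop := out = hash_code_alt s
instance (s : List Int) (out : Int) : Decidable (Spec_hash_code s out) := by unfold Spec_hash_code; infer_instance

-- ===== CLAIM (what is proved, stated in full; the proofs are below) =====
def Claim_equal_hash_code : Prop := ∀ (s : List Int), Dom_hash_code s → Spec_hash_code s (hash_code s)

-- ===== LEMMAS AND PROOFS =====

-- signed 32-bit residue of x
def pvS32 (x : Int) : Int :=
  if x % 4294967296 ≥ 2147483648 then x % 4294967296 - 4294967296 else x % 4294967296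

-- signed-byte adjustment
def pvAdj (c : Int) : Int := if c > 127 then c - 256 else c

-- the exact (unreduced) Horner value A chases
def pvHorner (s : List Int) (a : Int) : Int := s.foldl (fun h c => h * 31 + pvAdj c) a

-- Σ adj r_j * 31^j over an (already reversed) list
def pvG : List Int → Int
  | [] => 0
  | c :: r => pvAdj c + 31 * pvG r

theorem pv_nat_mask31 (y : Nat) : y &&& 2147483647 = y % 2147483648 := by
  have h := Nat.and_two_pow_sub_one_eq_mod y 31
  norm_num at h
  exact h

theorem pv_nat_bit31 (y : Nat) : y &&& 2147483648 = y % 4294967296 - y % 2147483648 := by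
  have h1 := Nat.and_two_pow y 31
  have h2 := Nat.toNat_testBit y 31
  have h3 : y % (2147483648 * 2) = y % 2147483648 + 2147483648 * (y / 2147483648 % 2) :=
    Nat.mod_mul
  norm_num at h1 h2 h3 ⊢
  omega

theorem pv_band_mask31 (x : Int) : PySem.Int.band x (2147483648 - 1) = x % 2147483648 := by
  unfold PySem.Int.band
  split_ifs with h1 h2 h3 <;>
    first
      | (simp only [show ((2147483648 - 1 : Int)).toNat = 2147483647 from rfl] at *
         first
           | (rw [pv_nat_mask31]; omega)
           | (rw [Nat.and_comm, pv_nat_mask31]; omega))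
      | omega

theorem pv_band_bit31 (x : Int) :
    PySem.Int.band x 2147483648 = x % 4294967296 - x % 2147483648 := by
  unfold PySem.Int.band
  split_ifs with h1 h2 h3 <;>
    first
      | (simp only [show ((2147483648 : Int)).toNat = 2147483648 from rfl] at *
         first
           | (rw [pv_nat_bit31]; omega)
           | (rw [Nat.and_comm, pv_nat_bit31]; omega))
      | omega

theorem pv_reduce (x : Int) :
    PySem.Int.band x (2147483648 - 1) - PySem.Int.band x 2147483648 = pvS32 x := by
  rw [pv_band_mask31, pv_band_bit31]
  unfold pvS32
  split_ifs <;> omega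

theorem pv_condreduce (x : Int) :
    (if x > 2147483647 ∨ x < -2147483648 then pvS32 x else x) = pvS32 x := by
  unfold pvS32
  split_ifs <;> omega

theorem pvS32_emod (x : Int) : pvS32 x % 4294967296 = x % 4294967296 := by
  unfold pvS32
  split_ifs <;> omega

theorem pvS32_congr {x y : Int} (h : x % 4294967296 = y % 4294967296) :
    pvS32 x = pvS32 y := by
  unfold pvS32
  rw [h]

-- A's loop body equals one pvS32-reduced Horner step
theorem pv_bodyA (h c : Int) :
    (let c := if c > 127 then -256 + c else c
     let h := h * 31
     let h := if h > 2147483647 ∨ h < -2147483648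
              then PySem.Int.band h (2147483648 - 1) - PySem.Int.band h 2147483648 else h
     let h := h + c
     if h > 2147483647 ∨ h < -2147483648
     then PySem.Int.band h (2147483648 - 1) - PySem.Int.band h 2147483648 else h)
    = pvS32 (h * 31 + pvAdj c) := by
  simp only [pv_reduce, pv_condreduce, pvAdj]
  have hc : (if c > 127 then -256 + c else c) = (if c > 127 then c - 256 else c) := by
    split_ifs <;> ring
  rw [hc]
  apply pvS32_congr
  have := pvS32_emod (h * 31)
  omega

theorem pv_foldA_eq (s : List Int) (a : Int) :
    s.foldl (fun h c =>
      let c := if c > 127 then -256 + c else c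
      let h := h * 31
      let h := if h > 2147483647 ∨ h < -2147483648
               then PySem.Int.band h (2147483648 - 1) - PySem.Int.band h 2147483648 else h
      let h := h + c
      if h > 2147483647 ∨ h < -2147483648
      then PySem.Int.band h (2147483648 - 1) - PySem.Int.band h 2147483648 else h) a
    = s.foldl (fun h c => pvS32 (h * 31 + pvAdj c)) a := by
  have hf : (fun (h c : Int) =>
      let c := if c > 127 then -256 + c else c
      let h := h * 31
      let h := if h > 2147483647 ∨ h < -2147483648
               then PySem.Int.band h (2147483648 - 1) - PySem.Int.band h 2147483648 else h
      let h := h + c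
      if h > 2147483647 ∨ h < -2147483648
      then PySem.Int.band h (2147483648 - 1) - PySem.Int.band h 2147483648 else h)
      = (fun (h c : Int) => pvS32 (h * 31 + pvAdj c)) := by
    funext h c
    exact pv_bodyA h c
  rw [hf]

-- A's reduced fold equals pvS32 of the exact Horner value
theorem pv_loopA : ∀ (s : List Int) (a b : Int), s ≠ [] → a % 4294967296 = b % 4294967296 →
    s.foldl (fun h c => pvS32 (h * 31 + pvAdj c)) a = pvS32 (pvHorner s b) := by
  intro s
  induction s with
  | nil => intro a b hne _; exact absurd rfl hne
  | cons c rest ih =>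
    intro a b _ hab
    simp only [List.foldl_cons, pvHorner] at *
    rcases eq_or_ne rest [] with hr | hr
    · subst hr
      simp only [List.foldl_nil]
      apply pvS32_congr
      have h1 : a * 31 % 4294967296 = b * 31 % 4294967296 := by
        have := Int.ModEq.mul_right 31 (hab : Int.ModEq 4294967296 a b)
        exact this
      omega
    · refine ih _ _ hr ?_
      rw [pvS32_emod]
      have h1 : a * 31 % 4294967296 = b * 31 % 4294967296 :=
        Int.ModEq.mul_right 31 (hab : Int.ModEq 4294967296 a b)
      omega

-- B's reversed fold invariant: first component ≡ t + q·(weighted sum) mod 2^32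
theorem pv_loopB : ∀ (r : List Int) (t p q : Int), p % 4294967296 = q % 4294967296 →
    (r.foldl (fun (tp : Int × Int) c =>
        (tp.1 + (if c > 127 then c - 256 else c) * tp.2,
         PySem.Int.mod (tp.2 * 31) 4294967296)) (t, p)).1 % 4294967296
    = (t + q * pvG r) % 4294967296 := by
  intro r
  induction r with
  | nil => intro t p q _; simp [pvG]
  | cons c r ih =>
    intro t p q hpq
    simp only [List.foldl_cons]
    have hmod : PySem.Int.mod (p * 31) 4294967296 = (p * 31) % 4294967296 :=
      PySem.Int.mod_eq_emod_of_pos (by norm_num)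
    rw [hmod]
    have h1 : (p * 31) % 4294967296 % 4294967296 = (q * 31) % 4294967296 := by
      have := Int.ModEq.mul_right 31 (hpq : Int.ModEq 4294967296 p q)
      omega
    rw [ih (t + (if c > 127 then c - 256 else c) * p) _ (q * 31) h1]
    have h2 : (if c > 127 then c - 256 else c) * p % 4294967296
        = (if c > 127 then c - 256 else c) * q % 4294967296 :=
      Int.ModEq.mul_left _ (hpq : Int.ModEq 4294967296 p q)
    have h3 : pvG (c :: r) = pvAdj c + 31 * pvG r := rfl
    have h4 : (t + (if c > 127 then c - 256 else c) * p + q * 31 * pvG r) % 4294967296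
        = (t + (if c > 127 then c - 256 else c) * q + q * 31 * pvG r) % 4294967296 := by
      have := Int.ModEq.add_right (q * 31 * pvG r)
        (Int.ModEq.add_left t (h2 : Int.ModEq 4294967296 _ _))
      exact this
    rw [h4, h3]
    ring_nf
    have hadj : pvAdj c = (if c > 127 then c - 256 else c) := rfl
    rw [hadj]
    ring_nf

-- the exact Horner value as seed·31^n plus the weighted sum of the reversed list
theorem pv_horner_sum (s : List Int) (a : Int) :
    pvHorner s a = a * 31 ^ s.length + pvG s.reverse := by
  induction s using List.reverseRecOn with
  | nil => simp [pvHorner, pvG]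
  | append_singleton s c ih =>
    have h1 : pvHorner (s ++ [c]) a = pvHorner s a * 31 + pvAdj c := by
      simp [pvHorner, List.foldl_append]
    rw [h1, ih]
    have h2 : (s ++ [c]).reverse = c :: s.reverse := by simp
    rw [h2]
    have h3 : pvG (c :: s.reverse) = pvAdj c + 31 * pvG s.reverse := rfl
    rw [h3]
    simp [List.length_append, pow_succ]
    ring

-- ===== VERDICT (by name: the statement is the Claim_ definition above) =====
theorem hash_code_spec : Claim_equal_hash_code := by
  intro s _
  unfold Spec_hash_code
  simp only [hash_code, hash_code_alt]
  cases s with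
  | nil => decide
  | cons c0 rest =>
    set s := c0 :: rest with hs
    have hne : s ≠ [] := by simp [hs]
    -- A side
    rw [pv_foldA_eq, pv_loopA s _ (s.length : Int) hne rfl]
    -- B side
    have hpowmod : PySem.Int.mod ((31 : Int) ^ s.length) 4294967296
        = ((31 : Int) ^ s.length) % 4294967296 :=
      PySem.Int.mod_eq_emod_of_pos (by norm_num)
    have hB := pv_loopB s.reverse ((s.length : Int) * PySem.Int.mod ((31:Int) ^ s.length) 4294967296) 1 1 rfl
    have humod : PySem.Int.mod
        ((s.reverse.foldl (fun (tp : Int × Int) c =>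
          (tp.1 + (if c > 127 then c - 256 else c) * tp.2,
           PySem.Int.mod (tp.2 * 31) 4294967296))
          (((s.length : Int) * PySem.Int.mod ((31:Int) ^ s.length) 4294967296), 1)).1) 4294967296
        = ((s.reverse.foldl (fun (tp : Int × Int) c =>
          (tp.1 + (if c > 127 then c - 256 else c) * tp.2,
           PySem.Int.mod (tp.2 * 31) 4294967296))
          (((s.length : Int) * PySem.Int.mod ((31:Int) ^ s.length) 4294967296), 1)).1) % 4294967296 :=
      PySem.Int.mod_eq_emod_of_pos (by norm_num)
    -- identify B's reduced value with pvS32 (pvHorner s len)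
    have hkey : (((s.length : Int) * PySem.Int.mod ((31:Int) ^ s.length) 4294967296) + 1 * pvG s.reverse)
        % 4294967296 = pvHorner s (s.length : Int) % 4294967296 := by
      rw [pv_horner_sum s (s.length : Int), hpowmod]
      have := Int.ModEq.add_right (pvG s.reverse)
        (Int.ModEq.mul_left (s.length : Int)
          ((Int.emod_emod_of_dvd _ (dvd_refl 4294967296)).trans rfl :
            Int.ModEq 4294967296 (((31:Int) ^ s.length) % 4294967296) ((31:Int) ^ s.length)))
      simpa [one_mul] using this
    have hBval : (s.reverse.foldl (fun (tp : Int × Int) c =>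
          (tp.1 + (if c > 127 then c - 256 else c) * tp.2,
           PySem.Int.mod (tp.2 * 31) 4294967296))
          (((s.length : Int) * PySem.Int.mod ((31:Int) ^ s.length) 4294967296), 1)).1 % 4294967296
        = pvHorner s (s.length : Int) % 4294967296 := by
      rw [hB]; exact hkey
    simp only [humod]
    have hfin : (if ((s.reverse.foldl (fun (tp : Int × Int) c =>
          (tp.1 + (if c > 127 then c - 256 else c) * tp.2,
           PySem.Int.mod (tp.2 * 31) 4294967296))
          (((s.length : Int) * PySem.Int.mod ((31:Int) ^ s.length) 4294967296), 1)).1 % 4294967296)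
          ≥ 2147483648
        then ((s.reverse.foldl (fun (tp : Int × Int) c =>
          (tp.1 + (if c > 127 then c - 256 else c) * tp.2,
           PySem.Int.mod (tp.2 * 31) 4294967296))
          (((s.length : Int) * PySem.Int.mod ((31:Int) ^ s.length) 4294967296), 1)).1 % 4294967296) - 4294967296
        else ((s.reverse.foldl (fun (tp : Int × Int) c =>
          (tp.1 + (if c > 127 then c - 256 else c) * tp.2,
           PySem.Int.mod (tp.2 * 31) 4294967296))
          (((s.length : Int) * PySem.Int.mod ((31:Int) ^ s.length) 4294967296), 1)).1 % 4294967296))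
        = pvS32 (pvHorner s (s.length : Int)) := by
      rw [hBval]
      unfold pvS32
      split_ifs <;> omega
    rw [hfin]
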